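-- pv_equiv track=rewrite | github.com/kawidney1/TurbdiostatGrowthRate | 230925_turbidostatanalysisscript.py | fittingbyself
-- ===== SOURCE A (Python) =====
-- from copy import copy
--
-- def fittingbyself(start, stop, times):
--     x = 0
--     check = False
--     while x < len(times) and check == False:
--         if times[x] < start:
--             startindex = copy(x) + 1
--         if times[x] > stop:
--             stopindex = copy(x)
--             check = True
--         if x == len(times) - 1:
--             stopindex = copy(x)
--             check = True
--         x = x + 1
--
--     return(startindex, stopindex)
-- ===== SOURCE B (Python) =====
-- def fittingbyself(start, stop, times):
--     stopindex = next((i for i, t in enumerate(times) if t > stop), len(times) - 1)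
--     startcands = [i + 1 for i in range(stopindex + 1) if times[i] < start]
--     return (startcands[-1], stopindex)
-- ===== Notes on version B (the rewrite author's own statement) =====
-- stated objective: simpler
-- what changed: Replaced the single stateful while-loop with mutable flag/index variables by two independent declarative passes: the stop index is the first element exceeding stop (next over enumerate, default len-1), and the start index is the last candidate of a list comprehension over the prefix up to the stop index.
import Mathlib
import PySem

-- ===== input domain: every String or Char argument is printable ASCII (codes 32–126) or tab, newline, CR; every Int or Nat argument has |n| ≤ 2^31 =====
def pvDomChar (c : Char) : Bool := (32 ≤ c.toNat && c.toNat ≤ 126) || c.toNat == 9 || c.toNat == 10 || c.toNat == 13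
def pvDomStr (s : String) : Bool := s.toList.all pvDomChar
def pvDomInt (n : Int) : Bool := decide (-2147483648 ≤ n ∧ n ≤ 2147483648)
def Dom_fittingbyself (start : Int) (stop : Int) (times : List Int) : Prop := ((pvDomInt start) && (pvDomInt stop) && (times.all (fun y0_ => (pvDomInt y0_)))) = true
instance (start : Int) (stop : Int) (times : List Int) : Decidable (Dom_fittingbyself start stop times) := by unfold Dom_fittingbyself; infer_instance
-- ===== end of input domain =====

-- B replaces A's single stateful while-loop (mutable check flag and index variables) by two
-- independent declarative passes: the first index whose element exceeds stop, then the last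
-- candidate below start in the prefix up to it; objective: simpler.  Where the Python A
-- raises UnboundLocalError, B raises too (IndexError); those inputs are outside Pre_.

-- ===== PORT A =====
-- Literal port of A's while loop: state (startindex, stopindex) as Options (unset = Python
-- unbound local, an exception excluded by Pre_; the final .getD 0 is unreachable under Pre_).
def fittingbyselfLoop (start : Int) (stop : Int) (times : List Int)
    (x : Nat) (si ti : Option Int) (check : Bool) : Option Int × Option Int :=
  if x < times.length ∧ check = false then
    let t := times.getD x 0
    let si' := if t < start then some ((x : Int) + 1) else si
    let ti' := if t > stop then some ((x : Int)) else ti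
    let check' := if t > stop then true else check
    let ti'' := if x = times.length - 1 then some ((x : Int)) else ti'
    let check'' := if x = times.length - 1 then true else check'
    fittingbyselfLoop start stop times (x + 1) si' ti'' check''
  else (si, ti)
termination_by times.length - x
decreasing_by omega


def fittingbyself (start : Int) (stop : Int) (times : List Int) : List Int :=
  let r := fittingbyselfLoop start stop times 0 none none false
  [r.1.getD 0, r.2.getD 0]

-- ===== PORT B =====
-- Literal port of Source B: stopindex = next((i for i, t in enumerate(times) if t > stop), len-1);
-- startcands = [i + 1 for i in range(stopindex + 1) if times[i] < start]; startcands[-1]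
-- (pyGet? none = Python IndexError, excluded by Pre_; the .getD 0 is unreachable under Pre_).
def fittingbyself_alt (start : Int) (stop : Int) (times : List Int) : List Int :=
  let stopindex : Int :=
    match times.findIdx? (fun t => decide (t > stop)) with
    | some i => (i : Int)
    | none => (times.length : Int) - 1
  let startcands : List Int :=
    List.map (fun i : Nat => ((i : Int) + 1))
      ((List.range (stopindex.toNat + 1)).filter (fun i => decide (times.getD i 0 < start)))
  let startindex : Int := (PySem.List.pyGet? startcands (-1)).getD 0
  [startindex, stopindex]

-- ===== PRECONDITION & SPEC =====
-- Pre_ excludes exactly the inputs where A raises UnboundLocalError: the empty list, and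
-- inputs where no scanned element (the prefix up to the first element > stop) is < start.
def Pre_fittingbyself (start : Int) (stop : Int) (times : List Int) : Prop :=
  times ≠ [] ∧ ∃ i < times.length, times.getD i 0 < start ∧ ∀ j < i, times.getD j 0 ≤ stop
instance (start : Int) (stop : Int) (times : List Int) : Decidable (Pre_fittingbyself start stop times) := by unfold Pre_fittingbyself; infer_instance

def pvWitness_fittingbyself : Int × Int × List Int := (5, 10, [1, 6, 11])

def Spec_fittingbyself (start : Int) (stop : Int) (times : List Int) (out : List Int) : Prop := out = fittingbyself_alt start stop times
instance (start : Int) (stop : Int) (times : List Int) (out : List Int) : Decidable (Spec_fittingbyself start stop times out) := by unfold Spec_fittingbyself; infer_instance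

-- ===== CLAIM (what is proved, stated in full; the proofs are below) =====
def Claim_equal_fittingbyself : Prop := ∀ (start : Int) (stop : Int) (times : List Int), Dom_fittingbyself start stop times → Pre_fittingbyself start stop times → Spec_fittingbyself start stop times (fittingbyself start stop times)

-- ===== LEMMAS AND PROOFS =====

-- The index at which A's scan stops, started at position x.
def stopAt (stop : Int) (times : List Int) (x : Nat) : Nat :=
  if x < times.length then
    if times.getD x 0 > stop then x
    else if x = times.length - 1 then x
    else stopAt stop times (x + 1)
  else x
termination_by times.length - x
decreasing_by omega


theorem stopAt_ge (stop : Int) (times : List Int) (x : Nat) : x ≤ stopAt stop times x := by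
  rw [stopAt]
  split_ifs with h1 h2 h3
  · exact le_refl x
  · exact le_refl x
  · exact le_trans (by omega) (stopAt_ge stop times (x + 1))
  · exact le_refl x
termination_by times.length - x
decreasing_by omega


theorem getLast?_cons_of_ne {α : Type} (a : α) (l : List α) (h : l ≠ []) :
    (a :: l).getLast? = l.getLast? := by
  cases l with
  | nil => exact absurd rfl h
  | cons b m => exact List.getLast?_cons_cons


-- A's loop from x < len (check = false, ti = none) yields the last candidate index in
-- [x, stopAt x] whose element is below start (shifted by +1; else si), and some (stopAt x).
theorem loop_eq (start stop : Int) (times : List Int) (x : Nat) (si : Option Int)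
    (hx : x < times.length) :
    fittingbyselfLoop start stop times x si none false =
      ((((List.range' x (stopAt stop times x + 1 - x)).filter
          (fun i => decide (times.getD i 0 < start))).getLast?).elim si
            (fun m => some ((m : Int) + 1)),
        some ((stopAt stop times x : Int))) := by
  rw [fittingbyselfLoop, if_pos (And.intro hx rfl)]
  by_cases hs : times.getD x 0 > stop
  · have hF : stopAt stop times x = x := by rw [stopAt, if_pos hx, if_pos hs]
    rw [hF]
    have h1 : x + 1 - x = 1 := by omega
    rw [h1, List.range'_one]
    rw [fittingbyselfLoop]
    have hs2 : stop < times[x]?.getD 0 := by simpa using hs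
    have hs3 : ¬(times[x]?.getD 0 ≤ stop) := not_le.mpr hs2
    by_cases hlt : times[x]?.getD 0 < start <;>
      simp [hs2, hs3, hlt, List.filter]
  · by_cases hl : x = times.length - 1
    · have hF : stopAt stop times x = x := by
        rw [stopAt, if_pos hx, if_neg hs, if_pos hl]
      rw [hF]
      have h1 : x + 1 - x = 1 := by omega
      rw [h1, List.range'_one]
      rw [fittingbyselfLoop]
      have hxx : ¬(x + 1 < times.length) := by omega
      simp [hxx, List.filter, if_pos hl]
      by_cases hlt : times[x]?.getD 0 < start <;> simp [hlt]
    · have hx1 : x + 1 < times.length := by omega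
      have hF : stopAt stop times x = stopAt stop times (x + 1) := by
        rw [stopAt, if_pos hx, if_neg hs, if_neg hl]
      rw [hF]
      have hge : x + 1 ≤ stopAt stop times (x + 1) := stopAt_ge stop times (x + 1)
      have hrange : List.range' x (stopAt stop times (x + 1) + 1 - x) =
          x :: List.range' (x + 1) (stopAt stop times (x + 1) + 1 - (x + 1)) := by
        have h2 : stopAt stop times (x + 1) + 1 - x =
            (stopAt stop times (x + 1) + 1 - (x + 1)) + 1 := by omega
        rw [h2, List.range'_succ]
      rw [hrange]
      have hrec := loop_eq start stop times (x + 1)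
        (if times.getD x 0 < start then some ((x : Int) + 1) else si) hx1
      simp only [hs, hl, ite_false, if_neg hs, if_neg hl]
      rw [hrec]
      rw [List.filter_cons]
      by_cases hlt : times.getD x 0 < start
      · simp only [hlt, decide_true, ite_true, if_pos hlt]
        cases hLast : ((List.range' (x + 1) (stopAt stop times (x + 1) + 1 - (x + 1))).filter
            (fun i => decide (times.getD i 0 < start))).getLast? with
        | none =>
          have hnil : ((List.range' (x + 1) (stopAt stop times (x + 1) + 1 - (x + 1))).filter
              (fun i => decide (times.getD i 0 < start))) = [] := by
            rwa [List.getLast?_eq_none_iff] at hLast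
          rw [hnil]
          simp
        | some m =>
          have hne : ((List.range' (x + 1) (stopAt stop times (x + 1) + 1 - (x + 1))).filter
              (fun i => decide (times.getD i 0 < start))) ≠ [] := by
            intro h; rw [h] at hLast; simp at hLast
          rw [getLast?_cons_of_ne _ _ hne, hLast]
          rfl
      · simp only [hlt, decide_false, ite_false, if_neg hlt]
        simp
termination_by times.length - x
decreasing_by omega

-- stopAt from x is the first index ≥ x whose element exceeds stop, else len - 1.
theorem stopAt_eq_findIdx (stop : Int) (times : List Int) (x : Nat) (hx : x < times.length) :
    stopAt stop times x =
      match (times.drop x).findIdx? (fun t => decide (t > stop)) with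
      | some i => x + i
      | none => times.length - 1 := by
  have hdrop : times.drop x = times.getD x 0 :: times.drop (x + 1) := by
    rw [List.getD_eq_getElem times 0 hx, List.drop_eq_getElem_cons hx]
  by_cases hs : times.getD x 0 > stop
  · rw [stopAt, if_pos hx, if_pos hs, hdrop, List.findIdx?_cons, if_pos (by simpa using hs)]
    simp
  · by_cases hl : x = times.length - 1
    · have hnil : times.drop (x + 1) = [] := by
        apply List.drop_eq_nil_of_le; omega
      rw [stopAt, if_pos hx, if_neg hs, if_pos hl, hdrop, List.findIdx?_cons,
        if_neg (by simpa using hs), hnil]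
      simp [hl]
    · have hx1 : x + 1 < times.length := by omega
      have hrec := stopAt_eq_findIdx stop times (x + 1) hx1
      rw [stopAt, if_pos hx, if_neg hs, if_neg hl, hrec, hdrop, List.findIdx?_cons,
        if_neg (by simpa using hs)]
      cases h : (times.drop (x + 1)).findIdx? (fun t => decide (t > stop)) with
      | none => simp
      | some i =>
          have hadd : x + 1 + i = x + (i + 1) := by omega
          simp [hadd]
termination_by times.length - x
decreasing_by omega

theorem fittingbyself_eq_alt (start stop : Int) (times : List Int) (hne : times ≠ []) :
    fittingbyself start stop times = fittingbyself_alt start stop times := by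
  have h0 : (0 : Nat) < times.length := List.length_pos_iff.mpr hne
  have hloop := loop_eq start stop times 0 none h0
  have hF := stopAt_eq_findIdx stop times 0 h0
  simp only [List.drop_zero, Nat.zero_add] at hF
  have hstop : (match times.findIdx? (fun t => decide (t > stop)) with
      | some i => (i : Int)
      | none => (times.length : Int) - 1) = ((stopAt stop times 0 : Nat) : Int) := by
    cases h : times.findIdx? (fun t => decide (t > stop)) with
    | some i => simp [hF, h]
    | none =>
        have hsub : ((times.length - 1 : Nat) : Int) = (times.length : Int) - 1 := by omega
        simp [hF, h, hsub]
  have htn : ((stopAt stop times 0 : Nat) : Int).toNat = stopAt stop times 0 := by simp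
  have hrange : List.range (stopAt stop times 0 + 1) =
      List.range' 0 (stopAt stop times 0 + 1 - 0) := by
    rw [Nat.sub_zero, List.range_eq_range']
  simp only [fittingbyself, fittingbyself_alt]
  rw [hloop, hstop, htn, hrange]
  cases hLast : ((List.range' 0 (stopAt stop times 0 + 1 - 0)).filter
      (fun i => decide (times.getD i 0 < start))).getLast? with
  | none =>
    have hnil : ((List.range' 0 (stopAt stop times 0 + 1 - 0)).filter
        (fun i => decide (times.getD i 0 < start))) = [] := by
      rwa [List.getLast?_eq_none_iff] at hLast
    rw [hnil]
    simp [PySem.List.pyGet?]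
  | some m =>
    have hmap : ((List.map (fun i : Nat => ((i : Int) + 1))
        ((List.range' 0 (stopAt stop times 0 + 1 - 0)).filter
          (fun i => decide (times.getD i 0 < start)))).getLast?) = some ((m : Int) + 1) := by
      rw [List.getLast?_map, hLast]
      rfl
    rw [PySem.List.pyGet?_neg_one, hmap]
    simp

-- ===== VERDICT (by name: the statement is the Claim_ definition above) =====
theorem fittingbyself_spec : Claim_equal_fittingbyself := by
  intro start stop times _ hpre
  unfold Spec_fittingbyself
  exact fittingbyself_eq_alt start stop times hpre.1
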